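-- pv_equiv track=rewrite | github.com/smack-o/wechat-app-hrbust-backend | app/python/image_filter.py | text_to_strings
-- ===== SOURCE A (Python) =====
-- def text_to_strings(str):
--     rep = {
--         'O': '0',
--         'R': '2',
--         'D': '0',
--
--     }
--     str = str.upper()
--     for r in rep:
--         str = str.replace(r, rep[r])
--     return str
-- ===== SOURCE B (Python) =====
-- def text_to_strings(str):
--     rep = {
--         'O': '0',
--         'R': '2',
--         'D': '0',
--     }
--     return ''.join(rep.get(c, c) for c in str.upper())
-- ===== Notes on version B (the rewrite author's own statement) =====
-- stated objective: simpler
-- what changed: One character-wise pass with a lookup table (get(c, c)) joined into the result, instead of three sequential full-string .replace passes after upper().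
import Mathlib
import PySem

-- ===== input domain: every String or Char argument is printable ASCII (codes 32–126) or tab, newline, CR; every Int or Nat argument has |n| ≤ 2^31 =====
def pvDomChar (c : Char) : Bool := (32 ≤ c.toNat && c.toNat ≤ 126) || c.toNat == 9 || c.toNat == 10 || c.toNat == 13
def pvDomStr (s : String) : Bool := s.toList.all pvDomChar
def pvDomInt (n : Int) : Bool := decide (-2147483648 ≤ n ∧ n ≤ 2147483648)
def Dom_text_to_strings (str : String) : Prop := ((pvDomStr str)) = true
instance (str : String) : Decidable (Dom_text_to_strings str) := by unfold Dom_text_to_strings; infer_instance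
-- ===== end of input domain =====

-- B replaces A's three sequential full-string .replace passes with one character-wise pass
-- over the uppercased string using a lookup table (objective: simpler).


-- ===== PORT A =====
def text_to_strings (str : String) : String :=
  let rep : PySem.Dict String String :=
    ((PySem.Dict.empty.insert "O" "0").insert "R" "2").insert "D" "0"
  let str := PySem.Str.upper str
  rep.keys.foldl (fun s r => PySem.Str.replace s r (rep.getD r "")) str

-- ===== PORT B =====
def text_to_strings_alt (str : String) : String :=
  let rep : PySem.Dict Char Char :=
    ((PySem.Dict.empty.insert 'O' '0').insert 'R' '2').insert 'D' '0'
  String.ofList ((PySem.Chars.upper str.toList).map (fun c => rep.getD c c))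

-- ===== PRECONDITION & SPEC =====
def Spec_text_to_strings (str : String) (out : String) : Prop := out = text_to_strings_alt str
instance (str : String) (out : String) : Decidable (Spec_text_to_strings str out) := by unfold Spec_text_to_strings; infer_instance

-- ===== CLAIM (what is proved, stated in full; the proofs are below) =====
def Claim_equal_text_to_strings : Prop := ∀ (str : String), Dom_text_to_strings str → Spec_text_to_strings str (text_to_strings str)

-- ===== LEMMAS AND PROOFS =====

-- replacing a single character by a single character is a map
theorem chars_replace_go_single (o n : Char) :
    ∀ (l : List Char) (fuel : Nat) (acc : List Char), l.length ≤ fuel →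
      PySem.Chars.replace.go [o] [n] fuel l acc
        = acc.reverse ++ l.map (fun c => if c = o then n else c) := by
  intro l
  induction l with
  | nil =>
    intro fuel acc _
    cases fuel <;> simp [PySem.Chars.replace.go]
  | cons c t ih =>
    intro fuel acc hle
    cases fuel with
    | zero => simp at hle
    | succ f =>
      by_cases h : c = o
      · subst h
        have : PySem.Chars.replace.go [c] [n] (f+1) (c :: t) acc
            = PySem.Chars.replace.go [c] [n] f t (n :: acc) := by
          simp [PySem.Chars.replace.go, List.isPrefixOf]
        rw [this, ih f (n :: acc) (by simpa using hle)]
        simp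
      · have : PySem.Chars.replace.go [o] [n] (f+1) (c :: t) acc
            = PySem.Chars.replace.go [o] [n] f t (c :: acc) := by
          simp [PySem.Chars.replace.go, List.isPrefixOf, Ne.symm h]
        rw [this, ih f (c :: acc) (by simpa using hle)]
        simp [h]

theorem chars_replace_single (s : List Char) (o n : Char) :
    PySem.Chars.replace s [o] [n] = s.map (fun c => if c = o then n else c) := by
  simp [PySem.Chars.replace]
  simpa using chars_replace_go_single o n s s.length [] (le_refl _)

-- ===== VERDICT (by name: the statement is the Claim_ definition above) =====
theorem text_to_strings_spec : Claim_equal_text_to_strings := by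
  intro str _
  show text_to_strings str = text_to_strings_alt str
  have hA : text_to_strings str
      = PySem.Str.replace (PySem.Str.replace (PySem.Str.replace (PySem.Str.upper str) "O" "0") "R" "2") "D" "0" := rfl
  rw [hA]
  simp only [PySem.Str.replace, PySem.Str.upper, text_to_strings_alt, String.toList_ofList]
  rw [show ("O".toList) = ['O'] from rfl, show ("0".toList) = ['0'] from rfl,
      show ("R".toList) = ['R'] from rfl, show ("2".toList) = ['2'] from rfl,
      show ("D".toList) = ['D'] from rfl,
      chars_replace_single, chars_replace_single, chars_replace_single, List.map_map,
      List.map_map]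
  apply congrArg String.ofList
  apply List.map_congr_left
  intro c _
  by_cases h1 : c = 'O'
  · subst h1; decide
  by_cases h2 : c = 'R'
  · subst h2; decide
  by_cases h3 : c = 'D'
  · subst h3; decide
  have e1 : ('O' == c) = false := by simp [Ne.symm h1]
  have e2 : ('R' == c) = false := by simp [Ne.symm h2]
  have e3 : ('D' == c) = false := by simp [Ne.symm h3]
  simp [PySem.Dict.getD, PySem.Dict.get?, PySem.Dict.insert, PySem.Dict.empty,
    List.find?, e1, e2, e3, h1, h2, h3]
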